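-- pv_equiv track=rewrite | github.com/loouissiuool/RomanceFraudDetectLineBot | services/domain/detection/detection_service.py | _infer_stage_counter
-- ===== SOURCE A (Python) =====
-- from typing import Dict, List, Any, Optional
--
-- def _infer_stage_counter(lbls: List[str]) -> int:
--     """
--     根據匹配到的關鍵字標籤計數，推斷詐騙階段。
--     優先回傳最晚出現的行為（數字越大越後期）。
--     """
--     stage_priority = {
--         6: {"repetition"},
--         5: {"sexual_request"},
--         4: {"payment"},
--         3: {"crisis", "emotion", "urgency", "pressure"},
--         2: {"romance", "bonding"},
--         1: {"friendly", "shared_interest", "compliment"},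
--         0: {"greeting"}
-- }
--
--     # 依照優先順序（從高到低）檢查是否出現
--     for stage, keywords in stage_priority.items():
--         if any(label in keywords for label in lbls):
--             return stage
--
--     return 0
-- ===== SOURCE B (Python) =====
-- # Flat inverted index keyword -> stage, then a single max-reduction over the labels.
-- _STAGE_OF = {
--     "repetition": 6,
--     "sexual_request": 5,
--     "payment": 4,
--     "crisis": 3, "emotion": 3, "urgency": 3, "pressure": 3,
--     "romance": 2, "bonding": 2,
--     "friendly": 1, "shared_interest": 1, "compliment": 1,
--     "greeting": 0,
-- }
--
-- def _infer_stage_counter(lbls):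
--     return max((_STAGE_OF[l] for l in lbls if l in _STAGE_OF), default=0)
-- ===== Notes on version B (the rewrite author's own statement) =====
-- stated objective: simpler
-- what changed: Replaces the high-to-low loop over per-stage keyword sets (early return on the first stage whose set intersects the labels) by a flat keyword-to-stage dict built once and a single max-reduction over the labels with default 0.
import Mathlib
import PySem

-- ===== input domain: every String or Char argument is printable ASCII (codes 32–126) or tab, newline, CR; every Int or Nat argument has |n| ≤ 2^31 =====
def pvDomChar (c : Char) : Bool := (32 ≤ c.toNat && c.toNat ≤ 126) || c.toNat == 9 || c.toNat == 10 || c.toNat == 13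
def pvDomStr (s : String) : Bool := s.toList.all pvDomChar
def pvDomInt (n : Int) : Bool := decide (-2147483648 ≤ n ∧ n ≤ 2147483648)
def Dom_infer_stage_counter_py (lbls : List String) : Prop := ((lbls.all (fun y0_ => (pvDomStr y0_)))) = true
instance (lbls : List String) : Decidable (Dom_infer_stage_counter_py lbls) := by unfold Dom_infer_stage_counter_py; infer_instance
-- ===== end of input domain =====

-- B replaces A's high-to-low loop over per-stage keyword sets by a flat keyword→stage dict plus one max-reduction over the labels (simpler, single pass).

-- ===== PORT A =====
-- the stage_priority dict (insertion order 6..0); each value is a set used only for membership tests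
def pvStagePriority : List (Int × List String) :=
  [(6, ["repetition"]),
   (5, ["sexual_request"]),
   (4, ["payment"]),
   (3, ["crisis", "emotion", "urgency", "pressure"]),
   (2, ["romance", "bonding"]),
   (1, ["friendly", "shared_interest", "compliment"]),
   (0, ["greeting"])]
def pvFindStage : List (Int × List String) → List String → Int
  | [], _ => 0
  | (s, kws) :: rest, lbls =>
      if lbls.any (fun l => kws.contains l) then s else pvFindStage rest lbls
def infer_stage_counter_py (lbls : List String) : Int :=
  pvFindStage pvStagePriority lbls
-- ===== PORT B =====
-- the flat inverted index _STAGE_OF, built once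
def pvStageOf : PySem.Dict String Int :=
  PySem.Dict.ofList
    [("repetition", 6), ("sexual_request", 5), ("payment", 4),
     ("crisis", 3), ("emotion", 3), ("urgency", 3), ("pressure", 3),
     ("romance", 2), ("bonding", 2),
     ("friendly", 1), ("shared_interest", 1), ("compliment", 1),
     ("greeting", 0)]
def infer_stage_counter_py_alt (lbls : List String) : Int :=
  match PySem.List.max? (lbls.filterMap (fun l => pvStageOf.get? l)) (fun v => v) with
  | some m => m
  | none => 0

-- ===== PRECONDITION & SPEC =====
def Spec_infer_stage_counter_py (lbls : List String) (out : Int) : Prop := out = infer_stage_counter_py_alt lbls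
instance (lbls : List String) (out : Int) : Decidable (Spec_infer_stage_counter_py lbls out) := by unfold Spec_infer_stage_counter_py; infer_instance

-- ===== CLAIM (what is proved, stated in full; the proofs are below) =====
def Claim_equal_infer_stage_counter_py : Prop := ∀ (lbls : List String), Dom_infer_stage_counter_py lbls → Spec_infer_stage_counter_py lbls (infer_stage_counter_py lbls)

-- ===== LEMMAS AND PROOFS =====
lemma foldl_max_shift : ∀ (F : List Int) (v w : Int), F.foldl max (max v w) = max v (F.foldl max w) := by
  intro F
  induction F with
  | nil => intro v w; rfl
  | cons x F ih =>
    intro v w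
    simp only [List.foldl_cons, max_assoc, ih]

lemma alt_cons_some (a : String) (t : List String) (v : Int) (hv : 0 ≤ v)
    (h : pvStageOf.get? a = some v) :
    infer_stage_counter_py_alt (a :: t) = max v (infer_stage_counter_py_alt t) := by
  simp only [infer_stage_counter_py_alt, List.filterMap_cons, h]
  cases ht : t.filterMap (fun l => pvStageOf.get? l) with
  | nil =>
    show v = max v (0:Int)
    exact (max_eq_left hv).symm
  | cons w F =>
    rw [PySem.List.max?_id_cons, PySem.List.max?_id_cons]
    show F.foldl max (max v w) = max v (F.foldl max w)
    exact foldl_max_shift F v w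

lemma alt_cons_none (a : String) (t : List String) (h : pvStageOf.get? a = none) :
    infer_stage_counter_py_alt (a :: t) = infer_stage_counter_py_alt t := by
  simp only [infer_stage_counter_py_alt, List.filterMap_cons, h]

set_option maxHeartbeats 2000000 in
lemma pv_main (lbls : List String) : infer_stage_counter_py lbls = infer_stage_counter_py_alt lbls := by
  induction lbls with
  | nil => rfl
  | cons a t ih =>
    by_cases h1 : a = "repetition"
    · subst h1
      rw [alt_cons_some _ t 6 (by norm_num) (by decide), ← ih]
      simp only [infer_stage_counter_py, pvStagePriority, pvFindStage, List.any_cons]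
      norm_num [List.contains_cons]
      try simp only [String.reduceEq, false_or]
      split_ifs <;> decide
    by_cases h2 : a = "sexual_request"
    · subst h2
      rw [alt_cons_some _ t 5 (by norm_num) (by decide), ← ih]
      simp only [infer_stage_counter_py, pvStagePriority, pvFindStage, List.any_cons]
      norm_num [List.contains_cons]
      try simp only [String.reduceEq, false_or]
      split_ifs <;> decide
    by_cases h3 : a = "payment"
    · subst h3
      rw [alt_cons_some _ t 4 (by norm_num) (by decide), ← ih]
      simp only [infer_stage_counter_py, pvStagePriority, pvFindStage, List.any_cons]
      norm_num [List.contains_cons]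
      try simp only [String.reduceEq, false_or]
      split_ifs <;> decide
    by_cases h4 : a = "crisis"
    · subst h4
      rw [alt_cons_some _ t 3 (by norm_num) (by decide), ← ih]
      simp only [infer_stage_counter_py, pvStagePriority, pvFindStage, List.any_cons]
      norm_num [List.contains_cons]
      try simp only [String.reduceEq, false_or]
      split_ifs <;> decide
    by_cases h5 : a = "emotion"
    · subst h5
      rw [alt_cons_some _ t 3 (by norm_num) (by decide), ← ih]
      simp only [infer_stage_counter_py, pvStagePriority, pvFindStage, List.any_cons]
      norm_num [List.contains_cons]
      try simp only [String.reduceEq, false_or]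
      split_ifs <;> decide
    by_cases h6 : a = "urgency"
    · subst h6
      rw [alt_cons_some _ t 3 (by norm_num) (by decide), ← ih]
      simp only [infer_stage_counter_py, pvStagePriority, pvFindStage, List.any_cons]
      norm_num [List.contains_cons]
      try simp only [String.reduceEq, false_or]
      split_ifs <;> decide
    by_cases h7 : a = "pressure"
    · subst h7
      rw [alt_cons_some _ t 3 (by norm_num) (by decide), ← ih]
      simp only [infer_stage_counter_py, pvStagePriority, pvFindStage, List.any_cons]
      norm_num [List.contains_cons]
      try simp only [String.reduceEq, false_or]
      split_ifs <;> decide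
    by_cases h8 : a = "romance"
    · subst h8
      rw [alt_cons_some _ t 2 (by norm_num) (by decide), ← ih]
      simp only [infer_stage_counter_py, pvStagePriority, pvFindStage, List.any_cons]
      norm_num [List.contains_cons]
      try simp only [String.reduceEq, false_or]
      split_ifs <;> decide
    by_cases h9 : a = "bonding"
    · subst h9
      rw [alt_cons_some _ t 2 (by norm_num) (by decide), ← ih]
      simp only [infer_stage_counter_py, pvStagePriority, pvFindStage, List.any_cons]
      norm_num [List.contains_cons]
      try simp only [String.reduceEq, false_or]
      split_ifs <;> decide
    by_cases h10 : a = "friendly"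
    · subst h10
      rw [alt_cons_some _ t 1 (by norm_num) (by decide), ← ih]
      simp only [infer_stage_counter_py, pvStagePriority, pvFindStage, List.any_cons]
      norm_num [List.contains_cons]
      try simp only [String.reduceEq, false_or]
      split_ifs <;> decide
    by_cases h11 : a = "shared_interest"
    · subst h11
      rw [alt_cons_some _ t 1 (by norm_num) (by decide), ← ih]
      simp only [infer_stage_counter_py, pvStagePriority, pvFindStage, List.any_cons]
      norm_num [List.contains_cons]
      try simp only [String.reduceEq, false_or]
      split_ifs <;> decide
    by_cases h12 : a = "compliment"
    · subst h12
      rw [alt_cons_some _ t 1 (by norm_num) (by decide), ← ih]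
      simp only [infer_stage_counter_py, pvStagePriority, pvFindStage, List.any_cons]
      norm_num [List.contains_cons]
      try simp only [String.reduceEq, false_or]
      split_ifs <;> decide
    by_cases h13 : a = "greeting"
    · subst h13
      rw [alt_cons_some _ t 0 (by norm_num) (by decide), ← ih]
      simp only [infer_stage_counter_py, pvStagePriority, pvFindStage, List.any_cons]
      norm_num [List.contains_cons]
      try simp only [String.reduceEq, false_or]
      split_ifs <;> decide
    have hg : pvStageOf.get? a = none := by
      have hmk : pvStageOf = PySem.Dict.mk [("repetition", (6:Int)), ("sexual_request", 5), ("payment", 4), ("crisis", 3), ("emotion", 3), ("urgency", 3), ("pressure", 3), ("romance", 2), ("bonding", 2), ("friendly", 1), ("shared_interest", 1), ("compliment", 1), ("greeting", 0)] := by decide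
      rw [hmk]
      simp only [PySem.Dict.get?_mk_cons]
      simp [Ne.symm h1, Ne.symm h2, Ne.symm h3, Ne.symm h4, Ne.symm h5, Ne.symm h6, Ne.symm h7, Ne.symm h8, Ne.symm h9, Ne.symm h10, Ne.symm h11, Ne.symm h12, Ne.symm h13]
      rfl
    rw [alt_cons_none a t hg, ← ih]
    simp only [infer_stage_counter_py, pvStagePriority, pvFindStage, List.any_cons,
      List.contains_cons, List.contains_nil]
    simp [beq_iff_eq, h1, h2, h3, h4, h5, h6, h7, h8, h9, h10, h11, h12, h13]


-- ===== VERDICT (by name: the statement is the Claim_ definition above) =====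
theorem infer_stage_counter_py_spec : Claim_equal_infer_stage_counter_py := by
  intro lbls _
  unfold Spec_infer_stage_counter_py
  exact pv_main lbls
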